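-- pv_equiv track=rewrite | github.com/prosseek/ChitchatSummaryScala | analysis/get_map.py | generate_arrays
-- ===== SOURCE A (Python) =====
-- MAX = 255
--
-- def generate_arrays(lines):
--     """Returns an array of 1 and 0
--
--     Idea:
--         1. given two values, put the values except the last one
--         2. put the last value only at the very last
--
--     Algorithm:
--         find the first and next values
--         1. case 1: next value is larger than the previous one
--             1. put the first into an array, and then put zeros if the next is not +1 from the previous value
--         2. case 2: next is smaller than the previous one
--
--     >>> generate_arrays([1,2,5])
--     [1, 1, 0, 0, 1]
--     >>> generate_arrays([254,0])
--     [1, 0, 1]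
--     >>> generate_arrays([254,2])
--     [1, 0, 0, 0, 1]
--
--     """
--
--     assert len(lines) >= 2, "There should be more than two elements" # There should be at least two elements
--     result = []
--
--     index = 0
--     first_value = lines[index]
--     index += 1
--     next_value = lines[index]
--
--     while True:
--         # example: 3 4 -> + [1]
--         #          3 5 -> + [0 1]
--         if next_value > first_value:
--             distance = next_value - first_value
--             result += [1] + ([0] * (distance - 1))
--             #         First  Next values
--         else:
--             distance = MAX - first_value
--             result += [1] + ([0] * (distance))
--             #print "D1:%d (%d-%d)"  % (distance, first_value, next_value)
--
--             distance = next_value - 0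
--             result += ([0] * (distance))
--             #print "D2:%d"  % distance
--
--         # process the next
--         first_value = next_value
--         index += 1
--         try:
--             next_value = lines[index]
--         except:
--             # Always put the first value
--             result += [1]
--             break
--     return result
-- ===== SOURCE B (Python) =====
-- MAX = 255
--
-- def generate_arrays(lines):
--     assert len(lines) >= 2, "There should be more than two elements"
--     # segment length for each consecutive pair, same two-branch rule as the spec
--     lens = [(b - a) if b > a else (1 + max(MAX - a, 0) + max(b, 0))
--             for a, b in zip(lines, lines[1:])]
--     result = [0] * (sum(lens) + 1)
--     pos = 0
--     for L in lens:
--         result[pos] = 1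
--         pos += L
--     result[-1] = 1
--     return result
-- ===== Notes on version B (the rewrite author's own statement) =====
-- stated objective: alternative
-- what changed: B first computes each consecutive pair's segment length (same two-branch rule), preallocates a zero buffer of sum(lens)+1 and scatter-writes 1s at the cumulative positions plus a final 1, instead of A's while loop appending [1]+zero-runs per pair.
-- outside the precondition, e.g. on generate_arrays([1]): A raises AssertionError, B raises AssertionError
import Mathlib
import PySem

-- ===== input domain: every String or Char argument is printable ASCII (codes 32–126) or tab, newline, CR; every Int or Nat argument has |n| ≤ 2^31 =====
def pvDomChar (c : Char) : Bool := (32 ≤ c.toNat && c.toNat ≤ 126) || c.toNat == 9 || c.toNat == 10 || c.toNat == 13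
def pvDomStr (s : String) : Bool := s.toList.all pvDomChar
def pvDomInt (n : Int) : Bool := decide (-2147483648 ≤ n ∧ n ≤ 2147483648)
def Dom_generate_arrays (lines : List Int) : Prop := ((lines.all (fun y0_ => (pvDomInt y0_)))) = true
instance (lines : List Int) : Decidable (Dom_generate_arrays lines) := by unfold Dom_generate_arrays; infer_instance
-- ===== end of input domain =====

-- B scatter-writes 1s into a preallocated zero buffer from per-pair segment lengths instead of appending runs; objective: alternative decomposition, same cost.

-- ===== PORT A =====
def pvMAX : Int := 255

-- the while-loop of A: state (first_value, next_value, remaining lines, result)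
def generate_arrays_loop (first next : Int) (rest : List Int) (result : List Int) : List Int :=
  let result :=
    if next > first then
      -- result += [1] + [0]*(distance-1)   ([0]*k for k<0 is [] in Python, = replicate toNat)
      result ++ ([1] ++ List.replicate (next - first - 1).toNat 0)
    else
      -- result += [1] + [0]*(MAX-first);  result += [0]*(next-0)
      (result ++ ([1] ++ List.replicate (pvMAX - first).toNat 0))
        ++ List.replicate (next - 0).toNat 0
  match rest with
  | [] => result ++ [1]          -- IndexError branch: append final 1 and stop
  | n :: rs => generate_arrays_loop next n rs result

def generate_arrays (lines : List Int) : List Int :=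
  match lines with
  | a :: b :: rest => generate_arrays_loop a b rest []
  | _ => []                      -- assert len(lines) >= 2 fails: outside Pre_

-- ===== PORT B =====
def pvSegLen (a b : Int) : Int :=
  if b > a then b - a else 1 + max (pvMAX - a) 0 + max b 0

-- the list comprehension of Source B: segment length for each consecutive pair
def pvLens (lines : List Int) : List Int :=
  (lines.zip lines.tail).map (fun p => pvSegLen p.1 p.2)

def generate_arrays_alt (lines : List Int) : List Int :=
  let lens := pvLens lines
  let result := List.replicate ((lens.foldl (· + ·) 0) + 1).toNat 0
  -- for L in lens: result[pos] = 1; pos += L   (pos is always ≥ 0 here, so .toNat is exact)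
  let st := lens.foldl (fun (st : List Int × Int) L => (st.1.set st.2.toNat 1, st.2 + L)) (result, 0)
  -- result[-1] = 1
  st.1.set (st.1.length - 1) 1

-- ===== PRECONDITION & SPEC =====
-- Pre_ excludes only inputs with fewer than two elements, on which A's assert raises AssertionError.
def Pre_generate_arrays (lines : List Int) : Prop := 2 ≤ lines.length
instance (lines : List Int) : Decidable (Pre_generate_arrays lines) := by unfold Pre_generate_arrays; infer_instance
def pvWitness_generate_arrays : List Int := [1, 2, 5]

def Spec_generate_arrays (lines : List Int) (out : List Int) : Prop := out = generate_arrays_alt lines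
instance (lines : List Int) (out : List Int) : Decidable (Spec_generate_arrays lines out) := by unfold Spec_generate_arrays; infer_instance

-- ===== CLAIM (what is proved, stated in full; the proofs are below) =====
def Claim_equal_generate_arrays : Prop := ∀ (lines : List Int), Dom_generate_arrays lines → Pre_generate_arrays lines → Spec_generate_arrays lines (generate_arrays lines)

-- ===== LEMMAS AND PROOFS =====

-- the bitmap segment produced for one pair, in terms of its length
def pvSeg (L : Int) : List Int := 1 :: List.replicate (L.toNat - 1) 0

theorem pvSegLen_pos (a b : Int) : 1 ≤ pvSegLen a b := by
  unfold pvSegLen; split <;> omega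

-- A's per-pair loop body appends pvSeg of the segment length
theorem pvBody_eq (a b : Int) (acc : List Int) :
    (if b > a then acc ++ ([1] ++ List.replicate (b - a - 1).toNat (0 : Int))
     else (acc ++ ([1] ++ List.replicate (pvMAX - a).toNat 0)) ++ List.replicate (b - 0).toNat 0)
      = acc ++ pvSeg (pvSegLen a b) := by
  unfold pvSeg pvSegLen pvMAX
  split_ifs with h
  · have e : (b - a - 1).toNat = (b - a).toNat - 1 := by omega
    simp [e]
  · simp [List.append_assoc]
    omega

-- segments of the whole input, pair by pair
def pvSegs (a b : Int) (rest : List Int) : List Int :=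
  match rest with
  | [] => pvSeg (pvSegLen a b)
  | c :: rs => pvSeg (pvSegLen a b) ++ pvSegs b c rs

theorem loopA_eq : ∀ (rest : List Int) (first next : Int) (acc : List Int),
    generate_arrays_loop first next rest acc = acc ++ pvSegs first next rest ++ [1] := by
  intro rest
  induction rest with
  | nil =>
    intro first next acc
    show (if next > first then _ else _) ++ [1] = _
    rw [pvBody_eq, pvSegs]
  | cons c rs ih =>
    intro first next acc
    show generate_arrays_loop next c rs (if next > first then _ else _) = _
    rw [pvBody_eq, ih, pvSegs]
    simp
theorem pvLens_cons (a b : Int) (rest : List Int) :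
    pvLens (a :: b :: rest) = pvSegLen a b :: pvLens (b :: rest) := by
  simp [pvLens]

-- pvSegs is the flattened pvSeg-image of the length list
theorem pvSegs_eq_flatten : ∀ (rest : List Int) (a b : Int),
    pvSegs a b rest = ((pvLens (a :: b :: rest)).map pvSeg).flatten := by
  intro rest
  induction rest with
  | nil => intro a b; simp [pvSegs, pvLens]
  | cons c rs ih => intro a b; rw [pvSegs, pvLens_cons, List.map_cons, List.flatten_cons, ih]

def pvSumNat (lens : List Int) : Nat := (lens.map Int.toNat).sum

theorem pvSum_toNat : ∀ (lens : List Int), (∀ L ∈ lens, 1 ≤ L) →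
    ∀ (init : Int), (lens.foldl (· + ·) init) = init + (pvSumNat lens : Int) := by
  intro lens
  induction lens with
  | nil => intro _ init; simp [pvSumNat]
  | cons L ls ih =>
    intro h init
    simp only [List.foldl_cons]
    rw [ih (fun x hx => h x (by simp [hx]))]
    have h1 : 1 ≤ L := h L (by simp)
    simp [pvSumNat]
    omega

-- the scatter loop writes pvSeg blocks into the zero buffer, left to right
theorem scatter_eq : ∀ (lens : List Int), (∀ L ∈ lens, 1 ≤ L) →
    ∀ (done : List Int),
    (lens.foldl (fun (st : List Int × Int) L => (st.1.set st.2.toNat 1, st.2 + L))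
        (done ++ List.replicate (pvSumNat lens + 1) 0, (done.length : Int))).1
      = done ++ (lens.map pvSeg).flatten ++ [0] := by
  intro lens
  induction lens with
  | nil => intro _ done; simp [pvSumNat]
  | cons L ls ih =>
    intro h done
    have hL : 1 ≤ L := h L (by simp)
    simp only [List.foldl_cons]
    have hset : (done ++ List.replicate (pvSumNat (L :: ls) + 1) (0 : Int)).set
        ((done.length : Int)).toNat 1
        = (done ++ pvSeg L) ++ List.replicate (pvSumNat ls + 1) 0 := by
      have hsum : pvSumNat (L :: ls) = L.toNat + pvSumNat ls := by simp [pvSumNat]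
      rw [Int.toNat_natCast, List.set_append_right _ _ (le_refl _)]
      simp only [Nat.sub_self]
      have e : pvSumNat (L :: ls) + 1 = 1 + ((L.toNat - 1) + (pvSumNat ls + 1)) := by omega
      rw [e, List.replicate_add (n := 1), List.replicate_add]
      simp [pvSeg, List.set_cons_zero]
      simp [List.replicate_add, List.replicate_succ']
    rw [hset]
    have hpos : (done.length : Int) + L = (((done ++ pvSeg L).length : Nat) : Int) := by
      simp [pvSeg]
      omega
    rw [hpos, ih (fun x hx => h x (by simp [hx])) (done ++ pvSeg L)]
    simp

-- set result[-1] = 1 on a buffer ending in a single 0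
theorem set_last_eq (done : List Int) :
    (done ++ [0]).set ((done ++ [0]).length - 1) 1 = done ++ [1] := by
  have e : (done ++ [(0 : Int)]).length - 1 = done.length := by simp
  rw [e, List.set_append_right _ _ (le_refl _)]
  simp

-- B computes the same flattened segment list followed by 1
theorem altB_eq (lines : List Int) :
    generate_arrays_alt lines = ((pvLens lines).map pvSeg).flatten ++ [1] := by
  have hpos : ∀ L ∈ pvLens lines, 1 ≤ L := by
    intro L hL
    simp only [pvLens, List.mem_map] at hL
    obtain ⟨p, _, rfl⟩ := hL
    exact pvSegLen_pos p.1 p.2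
  have hsum : ((pvLens lines).foldl (· + ·) 0 + 1).toNat = pvSumNat (pvLens lines) + 1 := by
    rw [pvSum_toNat _ hpos 0]; omega
  have h2 := scatter_eq (pvLens lines) hpos []
  simp only [List.nil_append, List.length_nil, Nat.cast_zero] at h2
  show ((pvLens lines).foldl _ (List.replicate _ 0, 0)).1.set _ 1 = _
  rw [hsum, h2, set_last_eq]

theorem generate_arrays_eq (lines : List Int) (h : 2 ≤ lines.length) :
    generate_arrays lines = generate_arrays_alt lines := by
  match lines with
  | a :: b :: rest =>
    show generate_arrays_loop a b rest [] = _
    rw [loopA_eq, altB_eq, pvSegs_eq_flatten]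
    simp

-- ===== VERDICT (by name: the statement is the Claim_ definition above) =====
theorem generate_arrays_spec : Claim_equal_generate_arrays := by
  intro lines _ hpre
  exact generate_arrays_eq lines hpre
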